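-- pv_equiv track=rewrite | github.com/clarkwkw/GEStatProj | tp_analysis/preprocessing.py | batch_data
-- ===== SOURCE A (Python) =====
-- def batch_data(series, batch_count):
-- 	length = len(series)
-- 	batch_size = length // batch_count
-- 	arr = []
-- 	start = 0
-- 	for i in range(batch_count):
-- 		end = start + batch_size + (i < length % batch_count)
-- 		if end > length:
-- 			end = length
-- 		arr.append(series[start:end])
-- 		start = end
-- 	return arr
-- ===== SOURCE B (Python) =====
-- def batch_data(series, batch_count):
-- 	length = len(series)
-- 	batch_size = length // batch_count
-- 	rem = length % batch_count
-- 	return [series[i * batch_size + min(i, rem):(i + 1) * batch_size + min(i + 1, rem)]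
-- 	        for i in range(batch_count)]
-- ===== Notes on version B (the rewrite author's own statement) =====
-- stated objective: simpler
-- what changed: Replaces the sequential running-start accumulator loop (with its dead end>length clamp) by a single comprehension computing each slice's boundaries in closed form as i*batch_size + min(i, rem).
import Mathlib
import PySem

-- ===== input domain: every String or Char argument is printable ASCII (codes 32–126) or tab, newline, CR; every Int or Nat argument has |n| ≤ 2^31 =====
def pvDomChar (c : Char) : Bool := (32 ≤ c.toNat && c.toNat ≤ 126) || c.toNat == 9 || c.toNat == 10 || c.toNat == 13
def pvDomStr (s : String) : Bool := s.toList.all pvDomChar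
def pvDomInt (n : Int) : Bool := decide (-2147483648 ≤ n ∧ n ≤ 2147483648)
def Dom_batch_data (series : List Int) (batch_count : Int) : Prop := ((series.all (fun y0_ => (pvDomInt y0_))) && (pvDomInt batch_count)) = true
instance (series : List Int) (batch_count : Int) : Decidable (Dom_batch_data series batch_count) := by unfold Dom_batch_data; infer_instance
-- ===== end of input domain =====

-- B replaces A's sequential running-start accumulator (and its dead end>length clamp)
-- with closed-form slice boundaries i*batch_size + min(i, rem): objective 'simpler'.

-- ===== PORT A =====
def batch_data (series : List Int) (batch_count : Int) : List (List Int) :=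
  let length : Int := series.length
  let batch_size : Int := PySem.Int.floordiv length batch_count
  (((PySem.List.pyRange 0 batch_count 1).foldl
    (fun (st : List (List Int) × Int) i =>
      let e := st.2 + batch_size + (if i < PySem.Int.mod length batch_count then (1:Int) else 0)
      let e := if e > length then length else e
      (st.1 ++ [PySem.List.slice series (some st.2) (some e)], e))
    ([], 0))).1

-- ===== PORT B =====
def batch_data_alt (series : List Int) (batch_count : Int) : List (List Int) :=
  let length : Int := series.length
  let batch_size : Int := PySem.Int.floordiv length batch_count
  let rem : Int := PySem.Int.mod length batch_count
  (PySem.List.pyRange 0 batch_count 1).map (fun i =>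
    PySem.List.slice series (some (i * batch_size + min i rem))
                            (some ((i + 1) * batch_size + min (i + 1) rem)))

-- ===== PRECONDITION & SPEC =====
-- Pre_ excludes batch_count = 0, on which Python's '//' raises ZeroDivisionError.
def Pre_batch_data (_series : List Int) (batch_count : Int) : Prop := batch_count ≠ 0
instance (series : List Int) (batch_count : Int) : Decidable (Pre_batch_data series batch_count) := by unfold Pre_batch_data; infer_instance
def pvWitness_batch_data : List Int × Int := ([1, 2, 3], 2)

def Spec_batch_data (series : List Int) (batch_count : Int) (out : List (List Int)) : Prop := out = batch_data_alt series batch_count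
instance (series : List Int) (batch_count : Int) (out : List (List Int)) : Decidable (Spec_batch_data series batch_count out) := by unfold Spec_batch_data; infer_instance

-- ===== CLAIM (what is proved, stated in full; the proofs are below) =====
def Claim_equal_batch_data : Prop := ∀ (series : List Int) (batch_count : Int), Dom_batch_data series batch_count → Pre_batch_data series batch_count → Spec_batch_data series batch_count (batch_data series batch_count)

-- ===== LEMMAS AND PROOFS =====

-- min distributes the 0/1 extra element: min(i,rem) + [i<rem] = min(i+1,rem)
theorem pv_min_step (i rem : Int) :
    min i rem + (if i < rem then (1:Int) else 0) = min (i + 1) rem := by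
  rcases lt_or_ge i rem with h1 | h1 <;> simp [h1] <;> omega

-- loop invariant: after n iterations A's accumulator holds the first n formula slices
-- and the running start equals n*bs + min n rem (the clamp never fires, by hend)
theorem pv_loop_inv (series : List Int) (bs rem : Int) (hr : 0 ≤ rem) (n : Nat)
    (hend : ∀ k : Nat, k < n → ((k:Int) + 1) * bs + min ((k:Int) + 1) rem ≤ (series.length : Int)) :
    (List.map (fun k : Nat => (0:Int) + ↑k) (List.range n)).foldl
      (fun (st : List (List Int) × Int) i =>
        let e := st.2 + bs + (if i < rem then (1:Int) else 0)
        let e := if e > (series.length : Int) then (series.length : Int) else e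
        (st.1 ++ [PySem.List.slice series (some st.2) (some e)], e))
      ([], 0)
    = (List.map (fun k : Nat =>
         PySem.List.slice series (some ((k:Int) * bs + min (k:Int) rem))
                                 (some (((k:Int) + 1) * bs + min ((k:Int) + 1) rem))) (List.range n),
       (n:Int) * bs + min (n:Int) rem) := by
  induction n with
  | zero => simp [min_eq_left hr]
  | succ n ih =>
    have hend' : ∀ k : Nat, k < n → ((k:Int) + 1) * bs + min ((k:Int) + 1) rem ≤ (series.length : Int) :=
      fun k hk => hend k (Nat.lt_succ_of_lt hk)
    have hlast := hend n (Nat.lt_succ_self n)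
    rw [List.range_succ, List.map_append, List.foldl_append, ih hend']
    simp only [List.map_cons, List.map_nil, List.foldl_cons, List.foldl_nil, zero_add]
    have he : (n:Int) * bs + min (n:Int) rem + bs + (if (n:Int) < rem then (1:Int) else 0)
        = ((n:Int) + 1) * bs + min ((n:Int) + 1) rem := by
      have := pv_min_step (n:Int) rem
      nlinarith
    rw [he, if_neg (not_lt.mpr hlast)]
    refine Prod.ext (by simp) ?_
    push_cast
    ring

-- ===== VERDICT (by name: the statement is the Claim_ definition above) =====
theorem batch_data_spec : Claim_equal_batch_data := by
  intro series bc _ hpre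
  simp only [Spec_batch_data, batch_data, batch_data_alt]
  rcases lt_trichotomy bc 0 with hneg | hz | hpos
  · have h0 : (bc - 0).toNat = 0 := by omega
    rw [PySem.List.pyRange_one, h0]
    simp
  · exact absurd hz hpre
  · set L : Int := (series.length : Int) with hL
    have hL0 : 0 ≤ L := by positivity
    have hr : 0 ≤ PySem.Int.mod L bc := PySem.Int.mod_nonneg _ hpos
    have hrlt : PySem.Int.mod L bc < bc := PySem.Int.mod_lt _ hpos
    have hdm : PySem.Int.floordiv L bc * bc + PySem.Int.mod L bc = L :=
      PySem.Int.floordiv_mul_add_mod L bc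
    have hbs : 0 ≤ PySem.Int.floordiv L bc := by
      rw [PySem.Int.floordiv_eq_ediv_of_pos hpos]
      exact Int.ediv_nonneg hL0 (le_of_lt hpos)
    have hend : ∀ k : Nat, k < bc.toNat →
        ((k:Int) + 1) * PySem.Int.floordiv L bc + min ((k:Int) + 1) (PySem.Int.mod L bc) ≤ L := by
      intro k hk
      have h1 : ((k:Int) + 1) ≤ bc := by omega
      have h2 : ((k:Int) + 1) * PySem.Int.floordiv L bc ≤ bc * PySem.Int.floordiv L bc :=
        mul_le_mul_of_nonneg_right h1 hbs
      have h3 : min ((k:Int) + 1) (PySem.Int.mod L bc) ≤ PySem.Int.mod L bc := min_le_right _ _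
      nlinarith
    rw [PySem.List.pyRange_one]
    have hbc0 : (bc - 0).toNat = bc.toNat := by omega
    rw [hbc0]
    rw [pv_loop_inv series (PySem.Int.floordiv L bc) (PySem.Int.mod L bc) hr bc.toNat hend]
    simp [List.map_map, Function.comp, zero_add]
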